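-- pv_equiv track=rewrite | github.com/ionic101/sort-maze | run.py | estimate_remaining_cost
-- ===== SOURCE A (Python) =====
-- COST_PER_STEP = {'A': 1, 'B': 10, 'C': 100, 'D': 1000}
--
-- TARGET_ROOM_INDEX = {'A': 0, 'B': 1, 'C': 2, 'D': 3}
--
-- ROOM_HALLWAY_POSITIONS = [2, 4, 6, 8]
--
-- def estimate_remaining_cost(state):
--     hallway, rooms = state
--     total = 0
--     for pos, amphipod_type in enumerate(hallway):
--         if amphipod_type == '.':
--             continue
--         target_room = TARGET_ROOM_INDEX[amphipod_type]
--         target_pos = ROOM_HALLWAY_POSITIONS[target_room]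
--         total += (abs(pos - target_pos) + 1) * COST_PER_STEP[amphipod_type]
--     for room_index, room in enumerate(rooms):
--         for depth_index, amphipod_type in enumerate(room):
--             if amphipod_type == '.':
--                 continue
--             target_room = TARGET_ROOM_INDEX[amphipod_type]
--             blocking = any(occupant not in ('.', amphipod_type) for occupant in room[depth_index:])
--             if target_room != room_index or blocking:
--                 from_pos = ROOM_HALLWAY_POSITIONS[room_index]
--                 to_pos = ROOM_HALLWAY_POSITIONS[target_room]
--                 total += (depth_index + 1 + abs(from_pos - to_pos) + 1) * COST_PER_STEP[amphipod_type]
--     return total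
-- ===== SOURCE B (Python) =====
-- COST_PER_STEP = {'A': 1, 'B': 10, 'C': 100, 'D': 1000}
--
-- TARGET_ROOM_INDEX = {'A': 0, 'B': 1, 'C': 2, 'D': 3}
--
-- ROOM_HALLWAY_POSITIONS = [2, 4, 6, 8]
--
--
-- def _room_cost(room, room_index):
--     # one back-to-front pass; `below` holds the distinct occupant types strictly deeper
--     cost = 0
--     below = set()
--     for depth_index in range(len(room) - 1, -1, -1):
--         t = room[depth_index]
--         if t != '.':
--             target_room = TARGET_ROOM_INDEX[t]
--             blocking = any(o != t for o in below)
--             if target_room != room_index or blocking: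
--                 cost += (depth_index + 1
--                          + abs(ROOM_HALLWAY_POSITIONS[room_index] - ROOM_HALLWAY_POSITIONS[target_room])
--                          + 1) * COST_PER_STEP[t]
--             below.add(t)
--     return cost
--
--
-- def estimate_remaining_cost(state):
--     hallway, rooms = state
--     total = sum((abs(pos - ROOM_HALLWAY_POSITIONS[TARGET_ROOM_INDEX[t]]) + 1) * COST_PER_STEP[t]
--                 for pos, t in enumerate(hallway) if t != '.')
--     return total + sum(_room_cost(room, ri) for ri, room in enumerate(rooms))
-- ===== Notes on version B (the rewrite author's own statement) =====
-- stated objective: alternative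
-- what changed: Each room is now scanned once from the deepest slot upward while maintaining the set of occupant types seen strictly below, replacing A's per-slot rescan of the room tail (any over room[depth:]); the hallway sum becomes a comprehension.
import Mathlib
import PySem

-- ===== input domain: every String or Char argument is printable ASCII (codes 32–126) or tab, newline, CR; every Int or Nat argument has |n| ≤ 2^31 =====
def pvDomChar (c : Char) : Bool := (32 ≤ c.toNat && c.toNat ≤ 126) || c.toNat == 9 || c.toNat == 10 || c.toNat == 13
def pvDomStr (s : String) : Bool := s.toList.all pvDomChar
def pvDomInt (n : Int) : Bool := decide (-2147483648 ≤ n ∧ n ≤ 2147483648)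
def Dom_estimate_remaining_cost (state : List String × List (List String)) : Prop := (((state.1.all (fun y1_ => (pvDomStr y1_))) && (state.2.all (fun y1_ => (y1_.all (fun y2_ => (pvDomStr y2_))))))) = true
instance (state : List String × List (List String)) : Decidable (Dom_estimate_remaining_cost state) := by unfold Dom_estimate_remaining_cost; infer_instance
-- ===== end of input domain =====

-- B replaces A's per-slot rescan of the room tail by one back-to-front pass per room that
-- maintains the set of occupant types seen strictly deeper (objective: alternative decomposition).

-- module constants, shared by both ports
-- COST_PER_STEP[t]: total with default 0; Python raises KeyError there (excluded by Pre_)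
def costPerStep (t : String) : Int :=
  if t = "A" then 1 else if t = "B" then 10 else if t = "C" then 100
  else if t = "D" then 1000 else 0

-- TARGET_ROOM_INDEX[t]: total with default 3; Python raises KeyError off {'A','B','C','D'} (excluded by Pre_)
def targetRoom (t : String) : Int :=
  if t = "A" then 0 else if t = "B" then 1 else if t = "C" then 2 else 3

-- ROOM_HALLWAY_POSITIONS[i]: total with default 8; Python raises IndexError for i ∉ {0,1,2,3} (excluded by Pre_)
def roomPos (i : Int) : Int :=
  if i = 0 then 2 else if i = 1 then 4 else if i = 2 then 6 else 8

-- ===== PORT A =====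
-- 'for pos, amphipod_type in enumerate(hallway)' with the running total
def hallLoopA : List String → Int → Int → Int
  | [], _, total => total
  | t :: rest, pos, total =>
      hallLoopA rest (pos + 1)
        (if t = "." then total
         else total + (|pos - roomPos (targetRoom t)| + 1) * costPerStep t)

-- inner 'for depth_index, amphipod_type in enumerate(room)'; blocking rescans room[depth_index:] (= the current suffix)
def roomLoopA : List String → Int → Int → Int → Int
  | [], _, _, total => total
  | t :: rest, ri, depth, total =>
      roomLoopA rest ri (depth + 1)
        (if t = "." then total
         else
           let tr := targetRoom t
           let blocking := (t :: rest).any (fun occ => !(occ == "." || occ == t))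
           if tr != ri || blocking then
             total + (depth + 1 + |roomPos ri - roomPos tr| + 1) * costPerStep t
           else total)

-- outer 'for room_index, room in enumerate(rooms)'
def roomsLoopA : List (List String) → Int → Int → Int
  | [], _, total => total
  | room :: rest, ri, total => roomsLoopA rest (ri + 1) (roomLoopA room ri 0 total)

def estimate_remaining_cost (state : List String × List (List String)) : Int :=
  roomsLoopA state.2 0 (hallLoopA state.1 0 0)

-- ===== PORT B =====
-- _room_cost: one pass from the deepest slot up (structural recursion = the reversed loop),
-- returning (cost so far, set `below` of distinct types strictly deeper)
def roomCostB : List String → Int → Int → Int × PySem.Set String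
  | [], _, _ => (0, PySem.Set.empty)
  | t :: rest, ri, depth =>
      let p := roomCostB rest ri (depth + 1)
      if t = "." then p
      else
        let tr := targetRoom t
        let blocking := p.2.any (fun o => o != t)
        let cost := if tr != ri || blocking then
            p.1 + (depth + 1 + |roomPos ri - roomPos tr| + 1) * costPerStep t
          else p.1
        (cost, PySem.Set.add p.2 t)

def estimate_remaining_cost_alt (state : List String × List (List String)) : Int :=
  let total := (((PySem.List.enumerate state.1 0).filter (fun p => p.2 != ".")).map
      (fun p => (|p.1 - roomPos (targetRoom p.2)| + 1) * costPerStep p.2)).sum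
  total + ((PySem.List.enumerate state.2 0).map (fun p => (roomCostB p.2 p.1 0).1)).sum

-- ===== PRECONDITION & SPEC =====
-- Pre_: exactly where the Python A returns — every cell is '.' or one of 'A'..'D'
-- (else KeyError), and any room past index 3 is all '.' (else IndexError on
-- ROOM_HALLWAY_POSITIONS[room_index], which fires on every occupied slot there).
def Pre_estimate_remaining_cost (state : List String × List (List String)) : Prop :=
  (∀ t ∈ state.1, t = "." ∨ t = "A" ∨ t = "B" ∨ t = "C" ∨ t = "D") ∧
  (∀ room ∈ state.2, ∀ t ∈ room, t = "." ∨ t = "A" ∨ t = "B" ∨ t = "C" ∨ t = "D") ∧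
  (∀ room ∈ state.2.drop 4, ∀ t ∈ room, t = ".")
instance (state : List String × List (List String)) : Decidable (Pre_estimate_remaining_cost state) := by unfold Pre_estimate_remaining_cost; infer_instance

def pvWitness_estimate_remaining_cost : (List String × List (List String)) :=
  ([".", "B", "."], [["A", "."], ["C", "A"]])

def Spec_estimate_remaining_cost (state : List String × List (List String)) (out : Int) : Prop := out = estimate_remaining_cost_alt state
instance (state : List String × List (List String)) (out : Int) : Decidable (Spec_estimate_remaining_cost state out) := by unfold Spec_estimate_remaining_cost; infer_instance

-- ===== CLAIM (what is proved, stated in full; the proofs are below) =====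
def Claim_equal_estimate_remaining_cost : Prop := ∀ (state : List String × List (List String)), Dom_estimate_remaining_cost state → Pre_estimate_remaining_cost state → Spec_estimate_remaining_cost state (estimate_remaining_cost state)

-- ===== LEMMAS AND PROOFS =====

-- membership in B's `below` set: exactly the non-'.' occupants of the suffix
lemma roomCostB_mem (rest : List String) (ri : Int) :
    ∀ (d : Int) (o : String), o ∈ (roomCostB rest ri d).2 ↔ (o ≠ "." ∧ o ∈ rest) := by
  induction rest with
  | nil => simp [roomCostB, PySem.Set.empty]
  | cons t rs ih =>
      intro d o
      simp only [roomCostB]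
      by_cases ht : t = "."
      · rw [if_pos ht]
        simp only [ih, List.mem_cons]
        constructor
        · exact fun h => ⟨h.1, Or.inr h.2⟩
        · rintro ⟨h1, h | h2⟩
          · exact absurd (ht ▸ h) h1
          · exact ⟨h1, h2⟩
      · simp only [if_neg ht, PySem.Set.mem_add, ih, List.mem_cons]
        constructor
        · rintro (⟨h1, h2⟩ | h)
          · exact ⟨h1, Or.inr h2⟩
          · exact ⟨h ▸ ht, Or.inl h⟩
        · rintro ⟨h1, h | h2⟩
          · exact Or.inr h
          · exact Or.inl ⟨h1, h2⟩

-- the two blocking computations agree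
lemma blocking_eq (t : String) (rest : List String) (ri : Int) (d : Int) :
    ((roomCostB rest ri d).2.any (fun o => o != t)) =
      ((t :: rest).any (fun occ => !(occ == "." || occ == t))) := by
  rw [Bool.eq_iff_iff]
  simp only [List.any_cons, List.any_eq_true, roomCostB_mem, beq_self_eq_true, Bool.or_true,
    Bool.not_true, Bool.false_or, bne_iff_ne, ne_eq, Bool.not_eq_eq_eq_not, Bool.not_true,
    Bool.or_eq_false_iff, beq_eq_false_iff_ne]
  tauto

-- per-room: A's accumulating scan equals B's back-to-front pass
lemma roomAB (room : List String) (ri : Int) :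
    ∀ (d total : Int), roomLoopA room ri d total = total + (roomCostB room ri d).1 := by
  induction room with
  | nil => simp [roomLoopA, roomCostB]
  | cons t rest ih =>
      intro d total
      by_cases ht : t = "."
      · simp [roomLoopA, roomCostB, ht, ih]
      · simp only [roomLoopA, roomCostB, if_neg ht, ih]
        rw [blocking_eq t rest ri (d + 1)]
        cases hc : ((targetRoom t != ri) ||
            (t :: rest).any fun occ => !(occ == "." || occ == t)) <;>
          · simp only [hc, Bool.false_eq_true, if_false, if_true]
            try ring

-- outer loops
lemma roomsAB (rooms : List (List String)) :
    ∀ (ri total : Int), roomsLoopA rooms ri total =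
      total + ((PySem.List.enumerate rooms ri).map (fun p => (roomCostB p.2 p.1 0).1)).sum := by
  induction rooms with
  | nil => simp [roomsLoopA, PySem.List.enumerate_nil]
  | cons room rest ih =>
      intro ri total
      simp only [roomsLoopA, PySem.List.enumerate_cons, List.map_cons, List.sum_cons]
      rw [ih, roomAB]
      ring

lemma hallAB (hall : List String) :
    ∀ (pos total : Int), hallLoopA hall pos total =
      total + (((PySem.List.enumerate hall pos).filter (fun p => p.2 != ".")).map
        (fun p => (|p.1 - roomPos (targetRoom p.2)| + 1) * costPerStep p.2)).sum := by
  induction hall with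
  | nil => simp [hallLoopA, PySem.List.enumerate_nil]
  | cons t rest ih =>
      intro pos total
      simp only [hallLoopA, PySem.List.enumerate_cons, List.filter_cons]
      by_cases ht : t = "."
      · simp [ht, ih]
      · have : (t != ".") = true := by simp [ht]
        simp only [this, if_pos, if_neg ht, List.map_cons, List.sum_cons, ih]
        ring

-- ===== VERDICT (by name: the statement is the Claim_ definition above) =====
theorem estimate_remaining_cost_spec : Claim_equal_estimate_remaining_cost := by
  intro state _ _
  show estimate_remaining_cost state = estimate_remaining_cost_alt state
  simp only [estimate_remaining_cost, estimate_remaining_cost_alt]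
  rw [roomsAB, hallAB]
  ring
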